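-- pv_equiv track=rewrite | github.com/q847633684/RmworldEN_by_day | extract/core/exporters/keyed.py | _group_by_file_path
-- ===== SOURCE A (Python) =====
-- from typing import List, Tuple, Dict
--
-- def _group_by_file_path(
--     def_translations: List[Tuple]
-- ) -> Dict[str, List[Tuple]]:
--     """按 file_path 分组翻译数据"""
--     file_groups = {}
--     for item in def_translations:
--         key, text, tag, file_path = item[:4]
--         if file_path not in file_groups:
--             file_groups[file_path] = []
--         file_groups[file_path].append((key, text, tag))
--     return file_groups
-- ===== SOURCE B (Python) =====
-- def _group_by_file_path(def_translations):
--     """按 file_path 分组翻译数据 — dict comprehension over the distinct file paths."""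
--     return {
--         fp: [(key, text, tag) for (key, text, tag, fp2) in def_translations if fp2 == fp]
--         for fp in dict.fromkeys(item[3] for item in def_translations)
--     }
-- ===== Notes on version B (the rewrite author's own statement) =====
-- stated objective: idiomatic
-- what changed: B replaces A's incremental dict-building loop (membership test, init-to-[], append per item) with a dict comprehension: the distinct file paths are collected once with dict.fromkeys, then each group is a single filtered pass over the input.
import Mathlib
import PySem

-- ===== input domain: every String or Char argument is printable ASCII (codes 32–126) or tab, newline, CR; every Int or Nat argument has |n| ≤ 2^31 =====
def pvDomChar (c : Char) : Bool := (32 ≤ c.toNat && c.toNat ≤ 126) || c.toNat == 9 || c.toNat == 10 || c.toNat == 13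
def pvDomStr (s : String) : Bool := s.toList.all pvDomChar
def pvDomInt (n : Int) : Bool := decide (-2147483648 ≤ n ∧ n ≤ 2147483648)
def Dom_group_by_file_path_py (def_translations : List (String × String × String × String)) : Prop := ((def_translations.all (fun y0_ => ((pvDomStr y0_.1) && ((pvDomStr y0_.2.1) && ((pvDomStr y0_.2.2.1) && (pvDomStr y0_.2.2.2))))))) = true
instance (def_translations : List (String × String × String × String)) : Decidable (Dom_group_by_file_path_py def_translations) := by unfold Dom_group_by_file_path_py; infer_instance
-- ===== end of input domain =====

-- B replaces A's incremental dict-building loop with a dict comprehension: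
-- distinct file paths collected once, then one filtered pass per group (idiomatic; same return value).

-- ===== PORT A =====
-- A: for item in def_translations: key,text,tag,fp = item[:4]; if fp not in d: d[fp]=[]; d[fp].append((key,text,tag))
def group_by_file_path_py (def_translations : List (String × String × String × String)) : List (String × List (String × String × String)) :=
  (def_translations.foldl
    (fun d item =>
      let key := item.1; let text := item.2.1; let tag := item.2.2.1; let fp := item.2.2.2
      let d' := if d.contains fp then d else d.insert fp ([] : List (String × String × String))
      d'.modify fp [] (fun l => l ++ [(key, text, tag)]))
    PySem.Dict.empty).items

-- ===== PORT B =====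
-- B: {fp: [(k,t,g) for (k,t,g,fp2) in l if fp2 == fp] for fp in dict.fromkeys(item[3] for item in l)}
def group_by_file_path_py_alt (def_translations : List (String × String × String × String)) : List (String × List (String × String × String)) :=
  (PySem.List.dedup (def_translations.map (·.2.2.2))).map
    (fun fp =>
      (fp, (def_translations.filter (fun it => it.2.2.2 == fp)).map
             (fun it => (it.1, it.2.1, it.2.2.1))))

-- ===== PRECONDITION & SPEC =====
def Spec_group_by_file_path_py (def_translations : List (String × String × String × String)) (out : List (String × List (String × String × String))) : Prop := out = group_by_file_path_py_alt def_translations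
instance (def_translations : List (String × String × String × String)) (out : List (String × List (String × String × String))) : Decidable (Spec_group_by_file_path_py def_translations out) := by unfold Spec_group_by_file_path_py; infer_instance

-- ===== CLAIM (what is proved, stated in full; the proofs are below) =====
def Claim_equal_group_by_file_path_py : Prop := ∀ (def_translations : List (String × String × String × String)), Dom_group_by_file_path_py def_translations → Spec_group_by_file_path_py def_translations (group_by_file_path_py def_translations)

-- ===== LEMMAS AND PROOFS =====

-- A's loop body, named for the lemmas below
def pvStep (d : PySem.Dict String (List (String × String × String)))
    (item : String × String × String × String) : PySem.Dict String (List (String × String × String)) :=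
  let d' := if d.contains item.2.2.2 then d else d.insert item.2.2.2 []
  d'.modify item.2.2.2 [] (fun l => l ++ [(item.1, item.2.1, item.2.2.1)])

lemma pvStep_keys (d : PySem.Dict String (List (String × String × String)))
    (item : String × String × String × String) :
    (pvStep d item).keys = PySem.Set.add d.keys item.2.2.2 := by
  unfold pvStep PySem.Set.add
  by_cases h : d.contains item.2.2.2 = true
  · have hm : item.2.2.2 ∈ d.keys := (PySem.Dict.contains_iff_mem_keys d item.2.2.2).mp h
    simp only [h, if_true, PySem.Dict.keys_modify]
    rw [PySem.Dict.keys_insert_of_contains _ _ h]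
    simp [PySem.Set.contains, hm]
  · have hc : d.contains item.2.2.2 = false := by simpa using h
    have hm : item.2.2.2 ∉ d.keys := fun hx => h ((PySem.Dict.contains_iff_mem_keys d item.2.2.2).mpr hx)
    simp only [hc, Bool.false_eq_true, if_false, PySem.Dict.keys_modify,
      PySem.Dict.insert_insert_self]
    rw [PySem.Dict.keys_insert_of_not_contains _ _ hc]
    simp [PySem.Set.contains, hm]

lemma pvStep_nodup (d : PySem.Dict String (List (String × String × String)))
    (item : String × String × String × String) (h : d.keys.Nodup) :
    (pvStep d item).keys.Nodup := by
  rw [pvStep_keys]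
  unfold PySem.Set.add PySem.Set.contains
  split_ifs with hc
  · exact h
  · refine List.Nodup.append h (by simp) ?_
    intro a ha hb
    simp at hb; subst hb
    exact hc (List.contains_iff_mem.mpr ha)

lemma pvFold_nodup (l : List (String × String × String × String))
    (d : PySem.Dict String (List (String × String × String))) (h : d.keys.Nodup) :
    (l.foldl pvStep d).keys.Nodup := by
  induction l generalizing d with
  | nil => simpa using h
  | cons x xs ih => exact ih _ (pvStep_nodup d x h)

lemma pvFold_keys (l : List (String × String × String × String))
    (d : PySem.Dict String (List (String × String × String))) :
    (l.foldl pvStep d).keys = PySem.Set.update d.keys (l.map (·.2.2.2)) := by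
  induction l generalizing d with
  | nil => simp [PySem.Set.update]
  | cons x xs ih =>
      simp only [List.foldl_cons, List.map_cons, PySem.Set.update, ih, pvStep_keys]

lemma pvFold_getD (l : List (String × String × String × String))
    (d : PySem.Dict String (List (String × String × String))) (c : String) :
    (l.foldl pvStep d).getD c [] =
      d.getD c [] ++ (l.filter (fun it => it.2.2.2 == c)).map (fun it => (it.1, it.2.1, it.2.2.1)) := by
  induction l generalizing d with
  | nil => simp
  | cons x xs ih =>
      simp only [List.foldl_cons, ih]
      have hstep : (pvStep d x).getD c [] =
          if x.2.2.2 == c then d.getD c [] ++ [(x.1, x.2.1, x.2.2.1)] else d.getD c [] := by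
        unfold pvStep
        by_cases hc : d.contains x.2.2.2 = true
        · simp only [hc, if_true]
          rw [PySem.Dict.getD_modify]
          by_cases he : c = x.2.2.2
          · simp [he]
          · simp [he, beq_iff_eq, Ne.symm he]
        · have hc' : d.contains x.2.2.2 = false := by simpa using hc
          simp only [hc', Bool.false_eq_true, if_false]
          rw [PySem.Dict.getD_modify]
          by_cases he : c = x.2.2.2
          · subst he
            rw [if_pos rfl, PySem.Dict.getD_insert, if_pos rfl,
                PySem.Dict.getD_of_not_contains d _ hc']
            simp
          · rw [if_neg he, PySem.Dict.getD_insert, if_neg he]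
            simp [beq_iff_eq, Ne.symm he]
      rw [hstep]
      by_cases hx : x.2.2.2 = c
      · simp [hx]
      · simp [hx]

-- ===== VERDICT (by name: the statement is the Claim_ definition above) =====
theorem group_by_file_path_py_spec : Claim_equal_group_by_file_path_py := by
  intro l _
  unfold Spec_group_by_file_path_py group_by_file_path_py group_by_file_path_py_alt
  have hfold : ∀ d item, (fun d item =>
      let key := item.1; let text := item.2.1; let tag := item.2.2.1; let fp := item.2.2.2
      let d' := if d.contains fp then d else d.insert fp ([] : List (String × String × String))
      d'.modify fp [] (fun l => l ++ [(key, text, tag)])) d item = pvStep d item := fun _ _ => rfl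
  simp only [hfold]
  have hnd : (l.foldl pvStep PySem.Dict.empty).keys.Nodup :=
    pvFold_nodup l _ (by simp [PySem.Dict.empty])
  rw [PySem.Dict.items_eq_map_keys _ hnd ([] : List (String × String × String))]
  rw [pvFold_keys]
  have hkeys : PySem.Set.update (PySem.Dict.empty : PySem.Dict String (List (String × String × String))).keys (l.map (·.2.2.2))
      = PySem.List.dedup (l.map (·.2.2.2)) := by
    rw [PySem.List.dedup_eq_ofList, PySem.Set.ofList_eq_foldl]
    rfl
  rw [hkeys]
  refine List.map_congr_left ?_
  intro fp _
  rw [pvFold_getD]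
  simp
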